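-- pv_equiv track=rewrite | github.com/cjfal2/aLGoRiTHM | 백준/Silver/2189. Magickology/Magickology.py | is_semi_magick
-- ===== SOURCE A (Python) =====
-- def is_semi_magick(square, S):
--     n = len(square)
--     for row in square:
--         if sum(row) != S:
--             return False
--     for col in range(n):
--         if sum(square[row][col] for row in range(n)) != S:
--             return False
--     return True
-- ===== SOURCE B (Python) =====
-- def is_semi_magick(square, S):
--     n = len(square)
--     for row in square:
--         if sum(row) != S:
--             return False
--     col_sums = [0] * n
--     for row in square:
--         col_sums = [cs + x for cs, x in zip(col_sums, row)]
--     return all(t == S for t in col_sums)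
-- ===== Notes on version B (the rewrite author's own statement) =====
-- stated objective: alternative
-- what changed: Replaced the column-major nested re-scan (for each column, an inner indexed sum over all rows) by a single row-major pass that accumulates a column-sum table by elementwise (zip) addition, then a flat check of the table; Pre_ excludes ragged squares whose row sums all equal S, where A's column scan raises IndexError (or returns False before reaching the short row).
-- outside the precondition, e.g. on is_semi_magick([[3], [1, 2]], 3): A returns False, B returns False
import Mathlib
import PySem

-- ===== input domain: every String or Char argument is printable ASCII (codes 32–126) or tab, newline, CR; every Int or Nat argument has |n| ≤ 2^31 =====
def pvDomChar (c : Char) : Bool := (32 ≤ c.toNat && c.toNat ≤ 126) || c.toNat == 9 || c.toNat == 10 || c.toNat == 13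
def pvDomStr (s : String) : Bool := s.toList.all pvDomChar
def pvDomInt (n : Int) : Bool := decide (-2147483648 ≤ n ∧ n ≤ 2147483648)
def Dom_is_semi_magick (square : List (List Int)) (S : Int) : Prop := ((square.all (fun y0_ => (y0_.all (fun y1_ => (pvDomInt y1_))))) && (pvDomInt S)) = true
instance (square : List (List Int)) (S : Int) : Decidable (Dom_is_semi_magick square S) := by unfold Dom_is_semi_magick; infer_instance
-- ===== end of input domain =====

-- B: one row-major accumulation of a column-sum table instead of A's column-major nested re-scan (alternative decomposition; return-value equivalence on Pre_).

-- ===== PORT A =====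
-- row-check loop, then: for col in range(n): if sum(square[row][col] for row in range(n)) != S: return False
def is_semi_magick (square : List (List Int)) (S : Int) : Bool :=
  let n : Int := square.length
  if square.all (fun row => row.sum == S) then
    (PySem.List.pyRange 0 n 1).all (fun col =>
      ((PySem.List.pyRange 0 n 1).map
        (fun r => PySem.List.pyGetD (PySem.List.pyGetD square r []) col 0)).sum == S)
  else false

-- ===== PORT B =====
-- row-check loop, then col_sums := [0]*n; for row: col_sums := [cs + x for cs, x in zip(col_sums, row)]; all(t == S)
def is_semi_magick_alt (square : List (List Int)) (S : Int) : Bool :=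
  let n := square.length
  if square.all (fun row => row.sum == S) then
    (square.foldl (fun cs row => List.zipWith (fun cs x => cs + x) cs row)
      (List.replicate n (0 : Int))).all (fun t => t == S)
  else false

-- ===== PRECONDITION & SPEC =====
-- Pre_ excludes the ragged squares on which all row sums equal S but some row is shorter than the
-- square: there A's column scan indexes past a short row and raises IndexError (or returns False at
-- an earlier column before reaching the missing cell).
def Pre_is_semi_magick (square : List (List Int)) (S : Int) : Prop :=
  (∀ row ∈ square, row.sum = S) → ∀ row ∈ square, square.length ≤ row.length
instance (square : List (List Int)) (S : Int) : Decidable (Pre_is_semi_magick square S) := by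
  unfold Pre_is_semi_magick; infer_instance
def pvWitness_is_semi_magick : List (List Int) × Int := ([[1, 2], [2, 1]], 3)
def Spec_is_semi_magick (square : List (List Int)) (S : Int) (out : Bool) : Prop := out = is_semi_magick_alt square S
instance (square : List (List Int)) (S : Int) (out : Bool) : Decidable (Spec_is_semi_magick square S out) := by unfold Spec_is_semi_magick; infer_instance

-- ===== CLAIM (what is proved, stated in full; the proofs are below) =====
def Claim_equal_is_semi_magick : Prop := ∀ (square : List (List Int)) (S : Int), Dom_is_semi_magick square S → Pre_is_semi_magick square S → Spec_is_semi_magick square S (is_semi_magick square S)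

-- ===== LEMMAS AND PROOFS =====

-- the accumulated column-sum table, pointwise (length of cs is preserved since every row is long enough)
lemma foldl_zipWith_colsums (rows : List (List Int)) (cs : List Int)
    (h : ∀ r ∈ rows, cs.length ≤ r.length) :
    rows.foldl (fun cs row => List.zipWith (fun a b => a + b) cs row) cs =
      (List.range cs.length).map
        (fun c => cs.getD c 0 + (rows.map (fun r => r.getD c 0)).sum) := by
  induction rows generalizing cs with
  | nil =>
    simp only [List.foldl_nil, List.map_nil, List.sum_nil, add_zero]
    apply List.ext_getElem (by simp)
    intro i h1 h2
    simp [List.getD_eq_getElem?_getD, h1]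
  | cons row rows ih =>
    have hlen : (List.zipWith (fun a b => a + b) cs row).length = cs.length := by
      have := h row (by simp)
      simp [List.length_zipWith]; omega
    rw [List.foldl_cons, ih _ (by intro r hr; rw [hlen]; exact h r (by simp [hr]))]
    rw [hlen]
    apply List.map_congr_left
    intro c hc
    simp only [List.mem_range] at hc
    have hcr : c < row.length := lt_of_lt_of_le hc (h row (by simp))
    have : (List.zipWith (fun a b => a + b) cs row).getD c 0 = cs.getD c 0 + row.getD c 0 := by
      rw [List.getD_eq_getElem?_getD, List.getElem?_eq_getElem (by omega),
        List.getD_eq_getElem?_getD (l := cs), List.getElem?_eq_getElem hc,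
        List.getD_eq_getElem?_getD (l := row), List.getElem?_eq_getElem hcr]
      simp
    rw [this, List.map_cons, List.sum_cons]
    ring

-- ===== VERDICT (by name: the statement is the Claim_ definition above) =====
theorem is_semi_magick_spec : Claim_equal_is_semi_magick := by
  intro square S _ hpre
  unfold Spec_is_semi_magick is_semi_magick is_semi_magick_alt
  simp only []
  by_cases hrows : square.all (fun row => row.sum == S)
  · rw [if_pos hrows, if_pos hrows]
    have hsum : ∀ row ∈ square, row.sum = S := by
      intro r hr; simpa using (List.all_eq_true.mp hrows r hr)
    have hlen : ∀ row ∈ square, square.length ≤ row.length := hpre hsum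
    rw [foldl_zipWith_colsums square (List.replicate square.length 0)
      (by intro r hr; simpa using hlen r hr)]
    -- A side: rewrite the pyRange/pyGetD column sum into the same table
    have h1 : ∀ col : Int, (PySem.List.pyRange 0 (square.length : Int) 1).map
        (fun r => PySem.List.pyGetD (PySem.List.pyGetD square r []) col 0)
        = square.map (fun row => PySem.List.pyGetD row col 0) := by
      intro col
      rw [show (fun r => PySem.List.pyGetD (PySem.List.pyGetD square r []) col 0)
          = (fun row : List Int => PySem.List.pyGetD row col 0) ∘ (fun r => PySem.List.pyGetD square r []) from rfl,
        ← List.map_map, PySem.List.map_pyGetD_pyRange_zero']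
    simp only [h1]
    rw [PySem.List.pyRange_zero_nat]
    simp [List.all_map, Function.comp_def]
  · rw [if_neg hrows, if_neg hrows]
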